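-- pv_equiv track=rewrite | github.com/cschan279/canbus_comm | zhcx/test/nxr_frame.py | ext_id
-- ===== SOURCE A (Python) =====
-- def assert_var(var, typ, len_limit):
--     assert isinstance(var, typ)
--     assert var >= 0 and var < 2**len_limit
--     return
--
-- def ext_id(ptp=0x0, dst=0xff, src=0xf0, grp=0x0):
--     val_len = (1,8,8,3)
--     var = (ptp, dst, src, grp)
--     res = 0x060
--     for i in range(4):
--         assert_var(var[i], int, val_len[i])
--         res = res << val_len[i]
--         res += var[i]
--     return res
-- ===== SOURCE B (Python) =====
-- def ext_id(ptp=0x0, dst=0xff, src=0xf0, grp=0x0):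
--     fields = ((0x060, 11), (ptp, 1), (dst, 8), (src, 8), (grp, 3))
--     for v, ln in fields[1:]:
--         assert isinstance(v, int)
--         assert v >= 0 and v < 2 ** ln
--     bits = ''.join(format(v, '0%db' % ln) for v, ln in fields)
--     return int(bits, 2)
-- ===== Notes on version B (the rewrite author's own statement) =====
-- stated objective: alternative
-- what changed: Instead of A's shift-and-accumulate loop, B renders each field (including the 0x060 prefix) as a fixed-width binary string, concatenates them and parses the bit string with int(_, 2); bit positions come from string layout, not from shifting.
import Mathlib
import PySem

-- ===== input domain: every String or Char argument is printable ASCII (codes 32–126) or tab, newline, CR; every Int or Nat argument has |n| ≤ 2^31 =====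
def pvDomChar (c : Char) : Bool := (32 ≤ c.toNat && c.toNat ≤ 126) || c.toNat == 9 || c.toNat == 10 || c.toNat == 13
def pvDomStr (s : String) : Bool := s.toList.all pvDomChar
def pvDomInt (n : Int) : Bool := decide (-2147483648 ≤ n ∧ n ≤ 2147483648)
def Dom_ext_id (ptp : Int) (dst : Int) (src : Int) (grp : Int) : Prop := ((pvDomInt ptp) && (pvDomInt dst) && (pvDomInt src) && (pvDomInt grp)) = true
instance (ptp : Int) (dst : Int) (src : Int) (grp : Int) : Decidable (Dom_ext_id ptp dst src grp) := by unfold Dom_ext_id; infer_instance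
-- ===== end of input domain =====

-- B builds the id by formatting each field as a fixed-width binary string, concatenating and
-- parsing the bit string, instead of A's shift-and-accumulate loop; inputs failing A's asserts
-- (AssertionError) are outside Pre_.
-- ===== PORT A =====
-- loop 'for i in range(4): assert_var(...); res = res << val_len[i]; res += var[i]' as a fold;
-- shift amounts are the nonnegative literals of val_len, so '.toNat' on them is exact
def ext_id (ptp : Int) (dst : Int) (src : Int) (grp : Int) : Int :=
  let val_len : List Int := [1, 8, 8, 3]
  let var : List Int := [ptp, dst, src, grp]
  (PySem.List.pyRange 0 4 1).foldl
    (fun res i => (res <<< (PySem.List.pyGetD val_len i 0).toNat) + PySem.List.pyGetD var i 0) 0x060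

-- ===== PORT B =====
-- format(v, '0wb'): the w binary digits of v as chars, most significant first
-- (exact for 0 ≤ v < 2^w, which Pre_ guarantees for every field B formats)
def binFmt : Nat → Int → List Char
  | 0, _ => []
  | w + 1, v => binFmt w (v / 2) ++ [if v % 2 = 1 then '1' else '0']

-- int(bits, 2): parse the concatenated bit string
def parseBin (bits : List Char) : Int :=
  bits.foldl (fun a c => 2 * a + (if c = '1' then 1 else 0)) 0

def ext_id_alt (ptp : Int) (dst : Int) (src : Int) (grp : Int) : Int :=
  let fields : List (Int × Nat) := [(0x060, 11), (ptp, 1), (dst, 8), (src, 8), (grp, 3)]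
  parseBin ((fields.map (fun p => binFmt p.2 p.1)).flatten)

-- ===== PRECONDITION & SPEC =====
-- Pre_ = exactly the inputs passing A's asserts (each field nonnegative and below 2^len); A raises AssertionError otherwise
def Pre_ext_id (ptp : Int) (dst : Int) (src : Int) (grp : Int) : Prop :=
  0 ≤ ptp ∧ ptp < 2 ∧ 0 ≤ dst ∧ dst < 256 ∧ 0 ≤ src ∧ src < 256 ∧ 0 ≤ grp ∧ grp < 8
instance (ptp : Int) (dst : Int) (src : Int) (grp : Int) : Decidable (Pre_ext_id ptp dst src grp) := by unfold Pre_ext_id; infer_instance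
def pvWitness_ext_id : Int × Int × Int × Int := (0, 255, 240, 0)
def Spec_ext_id (ptp : Int) (dst : Int) (src : Int) (grp : Int) (out : Int) : Prop := out = ext_id_alt ptp dst src grp
instance (ptp : Int) (dst : Int) (src : Int) (grp : Int) (out : Int) : Decidable (Spec_ext_id ptp dst src grp out) := by unfold Spec_ext_id; infer_instance

-- ===== CLAIM (what is proved, stated in full; the proofs are below) =====
def Claim_equal_ext_id : Prop := ∀ (ptp : Int) (dst : Int) (src : Int) (grp : Int), Dom_ext_id ptp dst src grp → Pre_ext_id ptp dst src grp → Spec_ext_id ptp dst src grp (ext_id ptp dst src grp)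

-- ===== LEMMAS AND PROOFS =====
-- folding the parser from accumulator a shifts a past the whole block
theorem parse_foldl_shift (l : List Char) (a : Int) :
    l.foldl (fun a c => 2 * a + (if c = '1' then 1 else 0)) a
      = a * 2 ^ l.length + parseBin l := by
  induction l generalizing a with
  | nil => simp only [List.foldl_nil, List.length_nil, pow_zero, parseBin]; ring
  | cons c t ih =>
    have h2 : parseBin (c :: t) = (if c = '1' then (1 : Int) else 0) * 2 ^ t.length + parseBin t := by
      unfold parseBin
      rw [List.foldl_cons, ih]
      simp only [mul_zero, zero_add]
      rfl
    rw [List.foldl_cons, ih, h2, List.length_cons]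
    ring

theorem parseBin_append (l1 l2 : List Char) :
    parseBin (l1 ++ l2) = parseBin l1 * 2 ^ l2.length + parseBin l2 := by
  unfold parseBin
  rw [List.foldl_append, parse_foldl_shift]
  rfl

-- a field in range round-trips through its fixed-width binary rendering
theorem binFmt_spec (w : Nat) (v : Int) (h0 : 0 ≤ v) (h1 : v < 2 ^ w) :
    (binFmt w v).length = w ∧ parseBin (binFmt w v) = v := by
  induction w generalizing v with
  | zero =>
    constructor
    · simp [binFmt]
    · simp [binFmt, parseBin]; omega
  | succ w ih =>
    have hpow : (2 : Int) ^ (w + 1) = 2 ^ w * 2 := by ring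
    rw [hpow] at h1
    have hdiv0 : 0 ≤ v / 2 := by omega
    have hdiv1 : v / 2 < 2 ^ w := by omega
    obtain ⟨hl, hp⟩ := ih (v / 2) hdiv0 hdiv1
    constructor
    · simp [binFmt, hl]
    · rw [binFmt, parseBin_append, hp]
      have hbit : parseBin [if v % 2 = 1 then '1' else '0'] = v % 2 := by
        split_ifs with h
        · have h1 : parseBin ['1'] = 1 := by decide
          omega
        · have h0 : parseBin ['0'] = 0 := by decide
          omega
      simp only [hbit, List.length_cons, List.length_nil]
      omega

-- ===== VERDICT (by name: the statement is the Claim_ definition above) =====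
theorem ext_id_spec : Claim_equal_ext_id := by
  intro ptp dst src grp _ hpre
  obtain ⟨h1, h2, h3, h4, h5, h6, h7, h8⟩ := hpre
  unfold Spec_ext_id ext_id ext_id_alt
  obtain ⟨lp, pp⟩ := binFmt_spec 1 ptp h1 (by norm_num; omega)
  obtain ⟨ld, pd⟩ := binFmt_spec 8 dst h3 (by norm_num; omega)
  obtain ⟨ls, ps⟩ := binFmt_spec 8 src h5 (by norm_num; omega)
  obtain ⟨lg, pg⟩ := binFmt_spec 3 grp h7 (by norm_num; omega)
  have hc : parseBin (binFmt 11 0x060) = 0x060 ∧ (binFmt 11 0x060).length = 11 := by decide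
  simp only [List.map_cons, List.map_nil, List.flatten_cons, List.flatten_nil, List.append_nil,
             parseBin_append]
  simp only [List.length_append, lp, ld, ls, lg, pp, pd, ps, pg, hc.1]
  simp [PySem.List.pyRange, PySem.List.pyGetD, PySem.List.pyGet?, PySem.List.pyIdx?,
        List.range_succ, Int.shiftLeft_eq]
  ring
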